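-- pv_equiv track=rewrite | github.com/dmitriypereverza/python-lessons | lesson4/hw1-normal.py | get_matches_second_task_without_re
-- ===== SOURCE A (Python) =====
-- def get_matches_second_task_without_re(line):
--     """
--     >>> get_matches_second_task_without_re('mcqWiryMQhhTUZUOmcqWiryMQhhTxqKdSTKCYEJlE')
--     ['TUZ']
--     >>> get_matches_second_task_without_re('AMkgAYEOmHBSQsSUHKvSfbmxULaysmNOGIPHpEMu')
--     ['AY', 'NOGI']
--     >>> get_matches_second_task_without_re('GAMkgAYEOmHBSQsSUHKvSfbmxULaysmNOGIPHpEMujalpPLNzRWXfwHQqwksrFeipEUlTLec')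
--     ['AY', 'NOGI', 'P']
--     """
--     resultList = []
--     beforeLower = ''
--     afterUpper = ''
--     for char in line:
--         if char.islower():
--             if len(beforeLower) >= 2 and len(afterUpper) > 2:
--                 resultList.append(afterUpper[:-2])
--                 afterUpper = ''
--                 beforeLower = ''
--             if len(afterUpper):
--                 afterUpper = ''
--                 beforeLower = ''
--             beforeLower += char.lower()
--         elif char.isupper():
--             if len(beforeLower) >= 2:
--                 afterUpper += char
--                 continue
--             afterUpper = ''
--             beforeLower = ''
--     return resultList
-- ===== SOURCE B (Python) =====
-- def get_matches_second_task_without_re(line):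
--     # Group the cased characters into maximal same-case runs (non-letters are
--     # transparent separators in A, so they are simply skipped), then emit every
--     # uppercase run that sits between a >=2-long lowercase run and any later run.
--     runs = []  # [is_lower, [chars of the run]]
--     for c in line:
--         if c.islower() or c.isupper():
--             low = c.islower()
--             if runs and runs[-1][0] == low:
--                 runs[-1][1].append(c)
--             else:
--                 runs.append([low, [c]])
--     return [''.join(cur[:len(cur) - 2])
--             for (plow, prev), (clow, cur), _nxt in zip(runs, runs[1:], runs[2:])
--             if plow and len(prev) >= 2 and not clow and len(cur) > 2]
-- ===== Notes on version B (the rewrite author's own statement) =====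
-- stated objective: alternative
-- what changed: B replaces A's three-variable character-by-character state machine by grouping the cased characters into maximal same-case runs and then emitting, in one scan over the runs, every uppercase run longer than 2 that is preceded by a lowercase run of length >= 2 and followed by another run.
import Mathlib
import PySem

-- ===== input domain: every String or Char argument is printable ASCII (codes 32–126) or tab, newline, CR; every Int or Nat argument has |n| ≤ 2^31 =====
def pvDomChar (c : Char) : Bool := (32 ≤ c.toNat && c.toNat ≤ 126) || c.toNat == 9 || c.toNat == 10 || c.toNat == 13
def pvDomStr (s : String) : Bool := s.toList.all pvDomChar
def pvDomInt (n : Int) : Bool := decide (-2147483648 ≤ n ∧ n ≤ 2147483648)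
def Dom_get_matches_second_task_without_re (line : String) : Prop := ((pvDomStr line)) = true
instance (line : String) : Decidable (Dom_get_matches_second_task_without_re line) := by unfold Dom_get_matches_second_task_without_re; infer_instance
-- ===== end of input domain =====

-- B re-implements A by grouping the cased characters into maximal same-case runs and
-- emitting the qualifying uppercase runs in one scan over the runs (objective: alternative
-- decomposition; same asymptotic cost).

-- ===== PORT A =====
-- state = (resultList, beforeLower, afterUpper); one step of A's for-loop body
def pvStepA (st : List String × List Char × List Char) (c : Char) :
    List String × List Char × List Char :=
  let res := st.1
  let bl := st.2.1
  let au := st.2.2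
  if PySem.Chars.islower c then
    -- if len(beforeLower) >= 2 and len(afterUpper) > 2: append afterUpper[:-2]; reset
    let st1 := if 2 ≤ bl.length ∧ 2 < au.length then
        (res ++ [String.mk (PySem.List.slice au none (some (-2)))], ([] : List Char), ([] : List Char))
      else (res, bl, au)
    -- if len(afterUpper): reset
    let st2 := if st1.2.2.length ≠ 0 then (st1.1, ([] : List Char), ([] : List Char)) else st1
    -- beforeLower += char.lower()
    (st2.1, st2.2.1 ++ [PySem.Chars.lowerChar c], st2.2.2)
  else if PySem.Chars.isupper c then
    if 2 ≤ bl.length then (res, bl, au ++ [c]) else (res, [], [])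
  else st

def get_matches_second_task_without_re (line : String) : List String :=
  (line.toList.foldl pvStepA ([], [], [])).1

-- ===== PORT B =====
-- one step of B's run-building loop; runs are kept most-recent-first (Python appends
-- at the end and mutates runs[-1]; here the head is runs[-1]) and reversed at the end
def pvStepB (rr : List (Bool × List Char)) (c : Char) : List (Bool × List Char) :=
  if PySem.Chars.islower c || PySem.Chars.isupper c then
    let low := PySem.Chars.islower c
    match rr with
    | (l, s) :: rest => if l = low then (l, s ++ [c]) :: rest else (low, [c]) :: (l, s) :: rest
    | [] => [(low, [c])]
  else rr

-- the comprehension's filter/yield for one window (prev, cur) of the zip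
def pvW (a b : Bool × List Char) : List String :=
  if a.1 = true ∧ 2 ≤ a.2.length ∧ ¬ b.1 = true ∧ 2 < b.2.length then
    [String.mk (b.2.take (b.2.length - 2))]
  else []

-- B's comprehension over zip(runs, runs[1:], runs[2:]): sliding windows of three runs
def pvEmit : List (Bool × List Char) → List String
  | a :: b :: c :: rest => pvW a b ++ pvEmit (b :: c :: rest)
  | _ => []

def get_matches_second_task_without_re_alt (line : String) : List String :=
  pvEmit ((line.toList.foldl pvStepB []).reverse)

-- ===== PRECONDITION & SPEC =====
def Spec_get_matches_second_task_without_re (line : String) (out : List String) : Prop := out = get_matches_second_task_without_re_alt line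
instance (line : String) (out : List String) : Decidable (Spec_get_matches_second_task_without_re line out) := by unfold Spec_get_matches_second_task_without_re; infer_instance

-- ===== CLAIM (what is proved, stated in full; the proofs are below) =====
def Claim_equal_get_matches_second_task_without_re : Prop := ∀ (line : String), Dom_get_matches_second_task_without_re line → Spec_get_matches_second_task_without_re line (get_matches_second_task_without_re line)

-- ===== LEMMAS AND PROOFS =====

-- character facts: a Python-lowercase char is not uppercase and is fixed by .lower()
theorem pv_lower_upper_false (c : Char) (h : PySem.Chars.islower c = true) :
    PySem.Chars.isupper c = false := by
  unfold PySem.Chars.islower at h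
  unfold PySem.Chars.isupper
  simp only [Bool.and_eq_true, decide_eq_true_eq] at h
  simp only [Bool.and_eq_false_iff, decide_eq_false_iff_not]
  right
  intro hle
  exact absurd (le_trans h.1 hle) (by decide)

theorem pv_lowerChar_id (c : Char) (h : PySem.Chars.islower c = true) :
    PySem.Chars.lowerChar c = c := by
  unfold PySem.Chars.lowerChar
  rw [pv_lower_upper_false c h]
  simp

theorem pv_slice_take (au : List Char) :
    PySem.List.slice au none (some (-2)) = au.take (au.length - 2) := by
  rw [PySem.List.slice_to_neg_ofNat au 2 (by omega)]

-- branch-level characterization of A's loop body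
theorem pvStepA_lower (res : List String) (bl au : List Char) (c : Char)
    (hl : PySem.Chars.islower c = true) :
    pvStepA (res, bl, au) c =
      if 2 ≤ bl.length ∧ 2 < au.length then
        (res ++ [String.mk (au.take (au.length - 2))], [c], [])
      else if au = [] then (res, bl ++ [c], au)
      else (res, [c], []) := by
  by_cases h1 : 2 ≤ bl.length ∧ 2 < au.length
  · simp [pvStepA, hl, pv_lowerChar_id c hl, pv_slice_take, h1]
  · by_cases h2 : au = []
    · simp [pvStepA, hl, pv_lowerChar_id c hl, h1, h2]
    · have hlen : au.length ≠ 0 := by simpa [List.length_eq_zero_iff] using h2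
      simp [pvStepA, hl, pv_lowerChar_id c hl, h1, h2, hlen]

theorem pvStepA_upper (res : List String) (bl au : List Char) (c : Char)
    (hl : PySem.Chars.islower c = false) (hu : PySem.Chars.isupper c = true) :
    pvStepA (res, bl, au) c =
      if 2 ≤ bl.length then (res, bl, au ++ [c]) else (res, [], []) := by
  simp [pvStepA, hl, hu]

theorem pvStepA_other (st : List String × List Char × List Char) (c : Char)
    (hl : PySem.Chars.islower c = false) (hu : PySem.Chars.isupper c = false) :
    pvStepA st c = st := by
  simp [pvStepA, hl, hu]

-- branch-level characterization of B's loop body (cased characters only)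
theorem pvStepB_nil (c : Char) (hc : (PySem.Chars.islower c || PySem.Chars.isupper c) = true) :
    pvStepB [] c = [(PySem.Chars.islower c, [c])] := by
  simp [pvStepB, hc]

theorem pvStepB_same (c : Char) (l : Bool) (s : List Char) (rest : List (Bool × List Char))
    (hc : (PySem.Chars.islower c || PySem.Chars.isupper c) = true)
    (hll : l = PySem.Chars.islower c) :
    pvStepB ((l, s) :: rest) c = (l, s ++ [c]) :: rest := by
  simp [pvStepB, hc, hll]

theorem pvStepB_new (c : Char) (l : Bool) (s : List Char) (rest : List (Bool × List Char))
    (hc : (PySem.Chars.islower c || PySem.Chars.isupper c) = true)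
    (hll : ¬ l = PySem.Chars.islower c) :
    pvStepB ((l, s) :: rest) c = (PySem.Chars.islower c, [c]) :: (l, s) :: rest := by
  simp [pvStepB, hc, hll]

-- the contribution of the (now former) last two runs once a third one exists
def pvG : List (Bool × List Char) → List String
  | [a, b] => pvW a b
  | _ :: b :: c :: rest => pvG (b :: c :: rest)
  | _ => []

-- appending a run emits exactly the window formed by the previous last two runs,
-- independently of the appended run (B never emits for a run without a successor)
theorem pvEmit_snoc (xs : List (Bool × List Char)) (r : Bool × List Char) :
    pvEmit (xs ++ [r]) = pvEmit xs ++ pvG xs := by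
  match xs with
  | [] => simp [pvEmit, pvG]
  | [a] => simp [pvEmit, pvG]
  | [a, b] => simp [pvEmit, pvG]
  | a :: b :: c :: t =>
      have ih := pvEmit_snoc (b :: c :: t) r
      simp only [List.cons_append, pvEmit] at ih ⊢
      rw [ih]
      simp [pvG]

theorem pvG_append_pair (zs : List (Bool × List Char)) (x y : Bool × List Char) :
    pvG (zs ++ [x, y]) = pvW x y := by
  match zs with
  | [] => rfl
  | [a] => rfl
  | a :: b :: t =>
      have ih := pvG_append_pair (b :: t) x y
      have hstep : pvG ((a :: b :: t) ++ [x, y]) = pvG ((b :: t) ++ [x, y]) := by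
        cases t with
        | nil => rfl
        | cons d t' => rfl
      rw [hstep, ih]

-- A's state reconstructed from B's (reversed, most-recent-first) run list
def pvAbsBl : List (Bool × List Char) → List Char
  | (true, s) :: _ => s
  | (false, _) :: (true, p) :: _ => if 2 ≤ p.length then p else []
  | _ => []

def pvAbsAu : List (Bool × List Char) → List Char
  | (false, s) :: (true, p) :: _ => if 2 ≤ p.length then s else []
  | _ => []

def pvAbs (rr : List (Bool × List Char)) : List String × List Char × List Char :=
  (pvEmit rr.reverse, pvAbsBl rr, pvAbsAu rr)

-- the emitted list never depends on the head (most recent) run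
theorem pvE_cons (h : Bool × List Char) (rest : List (Bool × List Char)) :
    pvEmit ((h :: rest).reverse) = pvEmit rest.reverse ++ pvG rest.reverse := by
  rw [List.reverse_cons, pvEmit_snoc]

-- every run B ever builds is nonempty
def pvWF (rr : List (Bool × List Char)) : Prop := ∀ r ∈ rr, r.2 ≠ []

theorem pvWF_step (rr : List (Bool × List Char)) (c : Char) (h : pvWF rr) :
    pvWF (pvStepB rr c) := by
  unfold pvStepB
  split_ifs with hc
  · match rr with
    | [] => intro r hr; simp at hr; simp [hr]
    | (l, s) :: rest =>
        by_cases hll : l = PySem.Chars.islower c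
        · simp only [hll, if_true]
          intro r hr
          rcases List.mem_cons.mp hr with h1 | h2
          · simp [h1]
          · exact h r (List.mem_cons_of_mem _ h2)
        · simp only [hll, if_false]
          intro r hr
          rcases List.mem_cons.mp hr with h1 | h2
          · simp [h1]
          · exact h r h2
  · exact h

-- the commuting square: one step of A on the abstract state = abstraction of one step of B
theorem pv_step_comm (rr : List (Bool × List Char)) (c : Char) (hwf : pvWF rr) :
    pvStepA (pvAbs rr) c = pvAbs (pvStepB rr c) := by
  by_cases hl : PySem.Chars.islower c = true
  · have hc : (PySem.Chars.islower c || PySem.Chars.isupper c) = true := by simp [hl]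
    match rr with
    | [] =>
        rw [pvStepB_nil c hc, hl]
        simp [pvAbs, pvAbsBl, pvAbsAu, pvEmit, pvStepA_lower _ _ _ _ hl]
    | (true, s) :: rest =>
        rw [pvStepB_same c true s rest hc (by rw [hl])]
        simp only [pvAbs, pvAbsBl, pvAbsAu, pvStepA_lower _ _ _ _ hl]
        rw [pvE_cons (true, s ++ [c]) rest, pvE_cons (true, s) rest]
        norm_num
    | (false, s) :: rest =>
        have hs : s ≠ [] := hwf (false, s) (by simp)
        rw [pvStepB_new c false s rest hc (by rw [hl]; simp), hl]
        match rest with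
        | (true, p) :: t =>
            simp only [pvAbs, pvAbsBl, pvAbsAu, pvStepA_lower _ _ _ _ hl]
            rw [pvE_cons (true, [c]) ((false, s) :: (true, p) :: t),
                pvE_cons (false, s) ((true, p) :: t)]
            rw [show ((false, s) :: (true, p) :: t).reverse
                  = t.reverse ++ [((true, p) : Bool × List Char), (false, s)] by simp,
                pvG_append_pair]
            by_cases hp : 2 ≤ p.length
            · by_cases h2 : 2 < s.length
              · simp [pvAbsBl, pvAbsAu, pvW, hp, h2]
              · simp [pvAbsBl, pvAbsAu, pvW, hp, h2, hs]
            · simp [pvAbsBl, pvAbsAu, pvW, hp]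
        | (false, p) :: t =>
            simp only [pvAbs, pvAbsBl, pvAbsAu, pvStepA_lower _ _ _ _ hl]
            rw [pvE_cons (true, [c]) ((false, s) :: (false, p) :: t),
                pvE_cons (false, s) ((false, p) :: t)]
            rw [show ((false, s) :: (false, p) :: t).reverse
                  = t.reverse ++ [((false, p) : Bool × List Char), (false, s)] by simp,
                pvG_append_pair]
            simp [pvAbsBl, pvAbsAu, pvW]
        | [] =>
            simp only [pvAbs, pvAbsBl, pvAbsAu, pvStepA_lower _ _ _ _ hl]
            rw [pvE_cons (true, [c]) [(false, s)]]
            simp [pvAbsBl, pvAbsAu, pvEmit, pvG]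
  · have hl' : PySem.Chars.islower c = false := by simpa using hl
    by_cases hu : PySem.Chars.isupper c = true
    · have hc : (PySem.Chars.islower c || PySem.Chars.isupper c) = true := by simp [hu]
      match rr with
      | [] =>
          rw [pvStepB_nil c hc, hl']
          simp [pvAbs, pvAbsBl, pvAbsAu, pvEmit, pvStepA_upper _ _ _ _ hl' hu]
      | (false, s) :: rest =>
          rw [pvStepB_same c false s rest hc (by rw [hl'])]
          rw [show pvAbs ((false, s) :: rest)
                = (pvEmit ((false, s) :: rest).reverse, pvAbsBl ((false, s) :: rest),
                   pvAbsAu ((false, s) :: rest)) from rfl,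
              show pvAbs ((false, s ++ [c]) :: rest)
                = (pvEmit ((false, s ++ [c]) :: rest).reverse, pvAbsBl ((false, s ++ [c]) :: rest),
                   pvAbsAu ((false, s ++ [c]) :: rest)) from rfl]
          rw [pvE_cons (false, s ++ [c]) rest, pvE_cons (false, s) rest]
          match rest with
          | (true, p) :: t =>
              by_cases hp : 2 ≤ p.length
              · simp [pvAbsBl, pvAbsAu, hp, pvStepA_upper _ _ _ _ hl' hu]
              · simp [pvAbsBl, pvAbsAu, hp, pvStepA_upper _ _ _ _ hl' hu]
          | (false, p) :: t =>
              simp [pvAbsBl, pvAbsAu, pvStepA_upper _ _ _ _ hl' hu]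
          | [] =>
              simp [pvAbsBl, pvAbsAu, pvStepA_upper _ _ _ _ hl' hu]
      | (true, s) :: rest =>
          rw [pvStepB_new c true s rest hc (by rw [hl']; simp)]
          simp only [pvAbs, pvAbsBl, pvAbsAu, pvStepA_upper _ _ _ _ hl' hu, hl']
          rw [pvE_cons (false, [c]) ((true, s) :: rest), pvE_cons (true, s) rest]
          have hg : pvG (((true, s) :: rest).reverse) = [] := by
            match rest with
            | [] => simp [pvG]
            | r2 :: t =>
                rw [show ((true, s) :: r2 :: t).reverse
                      = t.reverse ++ [r2, ((true, s) : Bool × List Char)] by simp,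
                    pvG_append_pair]
                simp [pvW]
          rw [hg]
          by_cases h2 : 2 ≤ s.length
          · simp [pvAbsBl, pvAbsAu, h2]
          · simp [pvAbsBl, pvAbsAu, h2]
    · have hu' : PySem.Chars.isupper c = false := by simpa using hu
      simp [pvStepB, hl', hu', pvStepA_other _ _ hl' hu']

theorem pv_fold_comm (cs : List Char) (rr : List (Bool × List Char)) (hwf : pvWF rr) :
    cs.foldl pvStepA (pvAbs rr) = pvAbs (cs.foldl pvStepB rr) := by
  induction cs generalizing rr with
  | nil => rfl
  | cons c t ih =>
      simp only [List.foldl_cons, pv_step_comm rr c hwf]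
      exact ih (pvStepB rr c) (pvWF_step rr c hwf)

-- ===== VERDICT (by name: the statement is the Claim_ definition above) =====
theorem get_matches_second_task_without_re_spec : Claim_equal_get_matches_second_task_without_re := by
  intro line _
  unfold Spec_get_matches_second_task_without_re
  unfold get_matches_second_task_without_re get_matches_second_task_without_re_alt
  have h := pv_fold_comm line.toList [] (by intro r hr; simp at hr)
  have h0 : pvAbs [] = (([] : List String), ([] : List Char), ([] : List Char)) := rfl
  rw [h0] at h
  rw [h]
  rfl
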